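-- pv_equiv track=rewrite | github.com/Veroni4k-a/sdr_radio | vsync.py | find_vsync
-- ===== SOURCE A (Python) =====
-- def find_vsync(signal, threshold, min_width):
--     vsync_start = -1
--     vsync_end = -1
--
--     for i in range(len(signal)):
--         if signal[i] < threshold:
--             if vsync_start == -1:
--                 vsync_start = i
--             vsync_end = i
--         else:
--             if vsync_start != -1 and (vsync_end - vsync_start) >= min_width:
--                 return vsync_start, vsync_end
--             vsync_start = -1
--     return None, None
-- ===== SOURCE B (Python) =====
-- from itertools import groupby
--
-- def find_vsync(sig, threshold, min_width):
--     # segment the signal into maximal runs (below?, start index, length)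
--     runs = []
--     i = 0
--     for below, grp in groupby(sig, key=lambda x: x < threshold):
--         n = len(list(grp))
--         runs.append((below, i, n))
--         i += n
--     # a run only counts if it is closed by a later sample, so skip the final run
--     for below, start, n in runs[:-1]:
--         if below and n - 1 >= min_width:
--             return start, start + n - 1
--     return None, None
-- ===== Notes on version B (the rewrite author's own statement) =====
-- stated objective: simpler
-- what changed: B segments the signal into maximal runs with itertools.groupby and returns the first closed below-threshold run of index-span >= min_width, instead of A's stateful per-sample scan with -1 sentinels.
import Mathlib
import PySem

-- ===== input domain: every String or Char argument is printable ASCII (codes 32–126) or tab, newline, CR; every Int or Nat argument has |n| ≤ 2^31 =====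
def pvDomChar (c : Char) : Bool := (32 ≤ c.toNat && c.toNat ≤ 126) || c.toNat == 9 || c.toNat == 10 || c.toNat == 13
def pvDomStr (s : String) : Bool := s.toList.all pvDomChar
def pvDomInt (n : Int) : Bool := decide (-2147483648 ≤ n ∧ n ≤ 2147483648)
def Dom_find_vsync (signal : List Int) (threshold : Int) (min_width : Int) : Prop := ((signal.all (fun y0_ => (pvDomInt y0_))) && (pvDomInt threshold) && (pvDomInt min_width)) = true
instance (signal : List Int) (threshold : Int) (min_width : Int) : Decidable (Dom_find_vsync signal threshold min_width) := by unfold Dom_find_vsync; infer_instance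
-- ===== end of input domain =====

-- B replaces A's stateful per-sample scan (with -1 sentinels) by a groupby-style
-- segmentation into maximal runs followed by a scan over the closed runs (objective: simpler).


-- ===== PORT A =====
-- the for-loop over range(len(signal)) as structural recursion over the list
-- carrying the index i and the loop state (vsync_start, vsync_end)
def findALoop (threshold min_width : Int) : List Int → Int → Int → Int → Option Int × Option Int
  | [], _, _, _ => (none, none)
  | x :: rest, i, vs, ve =>
    if x < threshold then
      findALoop threshold min_width rest (i + 1) (if vs = -1 then i else vs) i
    else
      if vs ≠ -1 ∧ ve - vs ≥ min_width then (some vs, some ve)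
      else findALoop threshold min_width rest (i + 1) (-1) ve

def find_vsync (signal : List Int) (threshold : Int) (min_width : Int) : Option Int × Option Int :=
  findALoop threshold min_width signal 0 (-1) (-1)

-- ===== PORT B =====
-- groupby(signal, key = x < threshold) with a running index:
-- the list of maximal runs as (below?, start index, length)
def groupRuns (threshold : Int) : List Int → Int → List (Bool × Int × Int)
  | [], _ => []
  | x :: rest, i =>
    let b := decide (x < threshold)
    let run := rest.takeWhile (fun y => decide (y < threshold) == b)
    (b, i, (run.length : Int) + 1) ::
      groupRuns threshold (rest.dropWhile (fun y => decide (y < threshold) == b)) (i + run.length + 1)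
termination_by xs _ => xs.length
decreasing_by
  simp only [List.length_cons]
  exact Nat.lt_succ_of_le (List.length_dropWhile_le _ _)

def find_vsync_alt (signal : List Int) (threshold : Int) (min_width : Int) : Option Int × Option Int :=
  match (groupRuns threshold signal 0).dropLast.find?
          (fun g => g.1 && decide (g.2.2 - 1 ≥ min_width)) with
  | some (_, s, n) => (some s, some (s + n - 1))
  | none => (none, none)

-- ===== PRECONDITION & SPEC =====
def Spec_find_vsync (signal : List Int) (threshold : Int) (min_width : Int) (out : Option Int × Option Int) : Prop := out = find_vsync_alt signal threshold min_width
instance (signal : List Int) (threshold : Int) (min_width : Int) (out : Option Int × Option Int) : Decidable (Spec_find_vsync signal threshold min_width out) := by unfold Spec_find_vsync; infer_instance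

-- ===== CLAIM (what is proved, stated in full; the proofs are below) =====
def Claim_equal_find_vsync : Prop := ∀ (signal : List Int) (threshold : Int) (min_width : Int), Dom_find_vsync signal threshold min_width → Spec_find_vsync signal threshold min_width (find_vsync signal threshold min_width)

-- ===== LEMMAS AND PROOFS =====

-- B's scan over the closed runs, as a function of the run list
def altScan (min_width : Int) (G : List (Bool × Int × Int)) : Option Int × Option Int :=
  match G.dropLast.find? (fun g => g.1 && decide (g.2.2 - 1 ≥ min_width)) with
  | some (_, s, n) => (some s, some (s + n - 1))
  | none => (none, none)

theorem altScan_eq (signal : List Int) (threshold min_width : Int) :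
    find_vsync_alt signal threshold min_width = altScan min_width (groupRuns threshold signal 0) := rfl

-- consuming a below-threshold run while a run is already open (vs ≠ -1)
theorem findA_below_cont (threshold min_width : Int) (r : List Int)
    (hr : ∀ y ∈ r, y < threshold) :
    ∀ rest i s e, s ≠ -1 → r ≠ [] →
      findALoop threshold min_width (r ++ rest) i s e
        = findALoop threshold min_width rest (i + r.length) s (i + r.length - 1) := by
  induction r with
  | nil => intro _ _ _ _ _ h; exact absurd rfl h
  | cons y r' ih =>
    intro rest i s e hs _
    have hy : y < threshold := hr y (by simp)
    have hr' : ∀ z ∈ r', z < threshold := fun z hz => hr z (by simp [hz])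
    simp only [List.cons_append, findALoop, if_pos hy, if_neg hs]
    rcases eq_or_ne r' [] with h | h
    · subst h; simp
    · rw [ih hr' rest (i + 1) s i hs h]
      simp only [List.length_cons]
      push_cast; ring_nf

-- consuming an above-threshold run with no open run (vs = -1) leaves the state unchanged
theorem findA_above (threshold min_width : Int) (r : List Int)
    (hr : ∀ y ∈ r, ¬ y < threshold) :
    ∀ rest i e,
      findALoop threshold min_width (r ++ rest) i (-1) e
        = findALoop threshold min_width rest (i + r.length) (-1) e := by
  induction r with
  | nil => intro rest i e; simp
  | cons y r' ih =>
    intro rest i e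
    have hy : ¬ y < threshold := hr y (by simp)
    have hr' : ∀ z ∈ r', ¬ z < threshold := fun z hz => hr z (by simp [hz])
    simp only [List.cons_append, findALoop, if_neg hy]
    rw [if_neg (by simp)]
    rw [ih hr' rest (i + 1) e]
    simp only [List.length_cons]
    push_cast; ring_nf

-- opening and consuming a whole below-threshold run from the fresh state
theorem findA_below_fresh (threshold min_width : Int) (r : List Int)
    (hr : ∀ y ∈ r, y < threshold) :
    ∀ rest i e, 0 ≤ i → r ≠ [] →
      findALoop threshold min_width (r ++ rest) i (-1) e
        = findALoop threshold min_width rest (i + r.length) i (i + r.length - 1) := by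
  intro rest i e hi hne
  match r, hne with
  | y :: r', _ =>
    have hy : y < threshold := hr y (by simp)
    have hr' : ∀ z ∈ r', z < threshold := fun z hz => hr z (by simp [hz])
    have hi' : i ≠ -1 := by omega
    simp only [List.cons_append, findALoop, if_pos hy, if_true]
    rcases eq_or_ne r' [] with h | h
    · subst h; simp
    · rw [findA_below_cont threshold min_width r' hr' rest (i + 1) i i hi' h]
      simp only [List.length_cons]
      push_cast; ring_nf

-- the main invariant: from the fresh state, A's scan computes B's scan of the remaining runs
theorem main_inv (threshold min_width : Int) :
    ∀ N xs, xs.length ≤ N → ∀ i e, 0 ≤ i →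
      findALoop threshold min_width xs i (-1) e
        = altScan min_width (groupRuns threshold xs i) := by
  intro N
  induction N with
  | zero =>
    intro xs hxs i e _
    have : xs = [] := List.length_eq_zero_iff.mp (Nat.le_zero.mp hxs)
    subst this; simp [findALoop, groupRuns, altScan]
  | succ N ih =>
    intro xs hxs i e hi
    match xs with
    | [] => simp [findALoop, groupRuns, altScan]
    | x :: rest =>
      set b := decide (x < threshold) with hb
      set run := rest.takeWhile (fun y => decide (y < threshold) == b) with hrun
      set r := rest.dropWhile (fun y => decide (y < threshold) == b) with hrdef
      have hsplit : rest = run ++ r := (List.takeWhile_append_dropWhile).symm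
      have hrunkey : ∀ y ∈ run, decide (y < threshold) = b := by
        intro y hy
        have := List.mem_takeWhile_imp (hrun ▸ hy)
        simpa using this
      have hG : groupRuns threshold (x :: rest) i
          = (b, i, (run.length : Int) + 1) :: groupRuns threshold r (i + run.length + 1) := by
        rw [groupRuns]
      have hlenr : r.length ≤ rest.length := List.length_dropWhile_le _ _
      have hrN : r.length ≤ N := by
        simp only [List.length_cons] at hxs; omega
      have hxrun : x :: rest = (x :: run) ++ r := by rw [hsplit]; rfl
      have hkeyr : ∀ z r'', r = z :: r'' → ¬ ((decide (z < threshold) == b) = true) := by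
        intro z r'' hzr
        have h0 := List.head?_dropWhile_not (fun y => decide (y < threshold) == b) rest
        rw [← hrdef, hzr] at h0
        simpa using h0
      rw [hG]
      by_cases hxb : x < threshold
      · -- below-threshold run x :: run
        have hbtrue : b = true := by simp [hb, hxb]
        have hall : ∀ y ∈ x :: run, y < threshold := by
          intro y hy
          rcases List.mem_cons.mp hy with h | h
          · subst h; exact hxb
          · have := hrunkey y h; rw [hbtrue] at this; simpa using this
        have hL : findALoop threshold min_width (x :: rest) i (-1) e
            = findALoop threshold min_width r (i + (run.length + 1)) i (i + (run.length + 1) - 1) := by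
          rw [hxrun, findA_below_fresh threshold min_width (x :: run) hall r i e hi (by simp)]
          simp only [List.length_cons]; push_cast; ring_nf
        rw [hL]
        match r, hrN, hkeyr with
        | [], _, _ =>
          simp [findALoop, altScan, groupRuns]
        | z :: r'', hrN', hkey' =>
          have hz : ¬ z < threshold := by
            have := hkey' z r'' rfl
            rw [hbtrue] at this; simpa using this
          have hi' : i ≠ -1 := by omega
          have hGne : groupRuns threshold (z :: r'') (i + run.length + 1) ≠ [] := by
            rw [groupRuns]; simp
          rw [findALoop, if_neg hz]
          by_cases hw : ((i : Int) + (run.length + 1) - 1) - i ≥ min_width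
          · rw [if_pos ⟨hi', by omega⟩]
            have hpred : (b && decide (((run.length : Int) + 1) - 1 ≥ min_width)) = true := by
              rw [hbtrue]; simp only [Bool.true_and, decide_eq_true_iff]
              push_cast at hw ⊢; omega
            have hfind : List.find? (fun g => g.1 && decide (g.2.2 - 1 ≥ min_width))
                ((b, i, (run.length : Int) + 1) :: (groupRuns threshold (z :: r'') (i + run.length + 1)).dropLast)
                = some (b, i, (run.length : Int) + 1) := List.find?_cons_of_pos (by simpa using hpred)
            rw [altScan, List.dropLast_cons_of_ne_nil hGne, hfind]
          · rw [if_neg (by omega)]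
            have hstep : findALoop threshold min_width r'' (i + (run.length + 1) + 1) (-1) (i + (run.length + 1) - 1)
                = findALoop threshold min_width (z :: r'') (i + (run.length + 1)) (-1) (i + (run.length + 1) - 1) := by
              rw [findALoop, if_neg hz, if_neg (by simp)]
            rw [hstep, ih (z :: r'') hrN' (i + (run.length + 1)) _ (by omega)]
            rw [altScan, altScan, show (i : Int) + (run.length + 1) = i + run.length + 1 by ring,
              List.dropLast_cons_of_ne_nil hGne]
            have hpred : (b && decide (((run.length : Int) + 1) - 1 ≥ min_width)) = false := by
              rw [hbtrue]; simp only [Bool.true_and, decide_eq_false_iff_not]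
              push_cast at hw ⊢; omega
            have hfind : List.find? (fun g => g.1 && decide (g.2.2 - 1 ≥ min_width))
                ((b, i, (run.length : Int) + 1) :: (groupRuns threshold (z :: r'') (i + run.length + 1)).dropLast)
                = List.find? (fun g => g.1 && decide (g.2.2 - 1 ≥ min_width))
                    ((groupRuns threshold (z :: r'') (i + run.length + 1)).dropLast) :=
              List.find?_cons_of_neg (by simpa using hpred)
            rw [hfind]
      · -- above-threshold run x :: run
        have hbfalse : b = false := by simp [hb, hxb]
        have hall : ∀ y ∈ x :: run, ¬ y < threshold := by
          intro y hy
          rcases List.mem_cons.mp hy with h | h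
          · subst h; exact hxb
          · have := hrunkey y h; rw [hbfalse] at this; simpa using this
        have hL : findALoop threshold min_width (x :: rest) i (-1) e
            = findALoop threshold min_width r (i + (run.length + 1)) (-1) e := by
          rw [hxrun, findA_above threshold min_width (x :: run) hall r i e]
          simp only [List.length_cons]; push_cast; ring_nf
        rw [hL]
        match r, hrN with
        | [], _ =>
          simp [findALoop, altScan, groupRuns]
        | z :: r'', hrN' =>
          have hGne : groupRuns threshold (z :: r'') (i + run.length + 1) ≠ [] := by
            rw [groupRuns]; simp
          rw [ih (z :: r'') hrN' (i + (run.length + 1)) e (by omega)]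
          rw [altScan, altScan, show (i : Int) + (run.length + 1) = i + run.length + 1 by ring,
            List.dropLast_cons_of_ne_nil hGne]
          have hfind : List.find? (fun g => g.1 && decide (g.2.2 - 1 ≥ min_width))
              ((b, i, (run.length : Int) + 1) :: (groupRuns threshold (z :: r'') (i + run.length + 1)).dropLast)
              = List.find? (fun g => g.1 && decide (g.2.2 - 1 ≥ min_width))
                  ((groupRuns threshold (z :: r'') (i + run.length + 1)).dropLast) :=
            List.find?_cons_of_neg (by simp [hbfalse])
          rw [hfind]

-- ===== VERDICT (by name: the statement is the Claim_ definition above) =====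
theorem find_vsync_spec : Claim_equal_find_vsync := by
  intro signal threshold min_width _
  show find_vsync signal threshold min_width = find_vsync_alt signal threshold min_width
  rw [altScan_eq, find_vsync]
  exact main_inv threshold min_width signal.length signal le_rfl 0 (-1) le_rfl
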